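-- pv_equiv track=rewrite | github.com/lilleswing/adventcode | 2023/day03.py | get_num_idx
-- ===== SOURCE A (Python) =====
-- def isint(s):
--     try:
--         int(s)
--         return True
--     except:
--         return False
--
-- def get_num_idx(s):
--     retval = []
--     state = 'SEARCHING'
--     start_idx = None
--     end_idx = None
--     for i in range(len(s)):
--         if isint(s[i]) and state == 'SEARCHING':
--             state = 'IN_NUM'
--             start_idx = i
--         if isint(s[i]) and state == 'IN_NUM':
--             continue
--         if not isint(s[i]) and state == 'IN_NUM':
--             state = 'SEARCHING'
--             end_idx = i
--             retval.append((start_idx, end_idx))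
--     if state == 'IN_NUM':
--         retval.append((start_idx, len(s)))
--     return retval
-- ===== SOURCE B (Python) =====
-- def isint(s):
--     try:
--         int(s)
--         return True
--     except:
--         return False
--
-- def get_num_idx(s):
--     retval = []
--     i = 0
--     while i < len(s):
--         if isint(s[i]):
--             j = i + 1
--             while j < len(s) and isint(s[j]):
--                 j += 1
--             retval.append((i, j))
--             i = j
--         else:
--             i += 1
--     return retval
-- ===== Notes on version B (the rewrite author's own statement) =====
-- stated objective: simpler
-- what changed: Replaces the SEARCHING/IN_NUM string state machine with three sequential ifs and an end-of-string flush by a two-pointer scan: on hitting a digit an inner loop advances j to the end of the run and appends (i, j) immediately, so no state variable, per-char string comparisons or trailing flush are needed.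
import Mathlib
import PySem

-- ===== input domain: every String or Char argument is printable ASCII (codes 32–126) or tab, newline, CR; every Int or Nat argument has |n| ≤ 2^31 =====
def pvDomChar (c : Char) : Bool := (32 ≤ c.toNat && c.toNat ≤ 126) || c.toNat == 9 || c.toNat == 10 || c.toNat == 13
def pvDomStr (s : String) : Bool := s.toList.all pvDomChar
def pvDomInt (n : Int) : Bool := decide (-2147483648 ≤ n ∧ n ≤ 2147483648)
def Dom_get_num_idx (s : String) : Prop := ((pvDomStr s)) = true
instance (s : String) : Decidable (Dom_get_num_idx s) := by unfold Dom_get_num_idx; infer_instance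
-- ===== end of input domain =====

-- B replaces A's SEARCHING/IN_NUM state machine with a plain two-pointer scan (simpler; same return value).

-- ===== PORT A =====
-- isint(s): int(s) succeeds?  (shared helper of A and B, exactly as in the Python module)
def pv_isint (s : String) : Bool := (PySem.Int.ofStr? s).isSome

-- loop body of A's `for i in range(len(s))`; receives (i, s[i]) (s[i] as the 1-char string).
-- state tuple = (retval, state, start_idx, end_idx)
def get_num_idx_step (st : List (Int × Int) × String × Option Int × Option Int)
    (p : Int × Char) : List (Int × Int) × String × Option Int × Option Int :=
  let (retval, state, start_idx, end_idx) := st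
  let i := p.1
  let c := String.mk [p.2]
  -- if isint(s[i]) and state == 'SEARCHING': state = 'IN_NUM'; start_idx = i
  let (state, start_idx) :=
    if pv_isint c && (state == "SEARCHING") then ("IN_NUM", some i) else (state, start_idx)
  -- if isint(s[i]) and state == 'IN_NUM': continue
  if pv_isint c && (state == "IN_NUM") then (retval, state, start_idx, end_idx)
  -- if not isint(s[i]) and state == 'IN_NUM': append (start_idx, i)
  else if !(pv_isint c) && (state == "IN_NUM") then
    (retval ++ [(start_idx.getD 0, i)], "SEARCHING", start_idx, some i)
  else (retval, state, start_idx, end_idx)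

def get_num_idx (s : String) : List (Int × Int) :=
  let cs := s.toList
  -- for i in range(len(s)): … s[i] …   (index i is always in range, so pyGetD's default is never read)
  let fin := (PySem.List.pyRange 0 (PySem.Str.len s) 1).foldl
    (fun st i => get_num_idx_step st (i, PySem.List.pyGetD cs i ' '))
    ([], "SEARCHING", none, none)
  let (retval, state, start_idx, _) := fin
  -- trailing flush: if state == 'IN_NUM': retval.append((start_idx, len(s)))
  if state == "IN_NUM" then retval ++ [(start_idx.getD 0, PySem.Str.len s)] else retval

-- ===== PORT B =====
-- outer while of Source B: advance over chars carrying the current index i;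
-- the inner `while j < len(s) and isint(s[j])` is the takeWhile over the following chars.
def get_num_idx_runs : List Char → Int → List (Int × Int)
  | [], _ => []
  | c :: rest, i =>
    if pv_isint (String.mk [c]) then
      let j := i + 1 + (rest.takeWhile (fun d => pv_isint (String.mk [d]))).length
      (i, j) :: get_num_idx_runs (rest.dropWhile (fun d => pv_isint (String.mk [d]))) j
    else
      get_num_idx_runs rest (i + 1)
  termination_by cs _ => cs.length
  decreasing_by
  · exact Nat.lt_succ_of_le (List.length_dropWhile_le _ _)
  · exact Nat.lt_succ_self _

def get_num_idx_alt (s : String) : List (Int × Int) := get_num_idx_runs s.toList 0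

-- ===== PRECONDITION & SPEC =====
def Spec_get_num_idx (s : String) (out : List (Int × Int)) : Prop := out = get_num_idx_alt s
instance (s : String) (out : List (Int × Int)) : Decidable (Spec_get_num_idx s out) := by unfold Spec_get_num_idx; infer_instance

-- ===== CLAIM (what is proved, stated in full; the proofs are below) =====
def Claim_equal_get_num_idx : Prop := ∀ (s : String), Dom_get_num_idx s → Spec_get_num_idx s (get_num_idx s)

-- ===== LEMMAS AND PROOFS =====
-- A's post-loop flush, as a function of the final loop state and len(s)
def pvFinish (st : List (Int × Int) × String × Option Int × Option Int) (n : Int) : List (Int × Int) :=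
  let (retval, state, start_idx, _) := st
  if state == "IN_NUM" then retval ++ [(start_idx.getD 0, n)] else retval

theorem pv_step_s_dig (r : List (Int × Int)) (sa e : Option Int) (i : Int) (c : Char)
    (h : pv_isint (String.mk [c]) = true) :
    get_num_idx_step (r, "SEARCHING", sa, e) (i, c) = (r, "IN_NUM", some i, e) := by
  simp [get_num_idx_step, h]

theorem pv_step_s_nd (r : List (Int × Int)) (sa e : Option Int) (i : Int) (c : Char)
    (h : pv_isint (String.mk [c]) = false) :
    get_num_idx_step (r, "SEARCHING", sa, e) (i, c) = (r, "SEARCHING", sa, e) := by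
  simp [get_num_idx_step, h]

theorem pv_step_n_dig (r : List (Int × Int)) (a : Int) (e : Option Int) (i : Int) (c : Char)
    (h : pv_isint (String.mk [c]) = true) :
    get_num_idx_step (r, "IN_NUM", some a, e) (i, c) = (r, "IN_NUM", some a, e) := by
  simp [get_num_idx_step, h]

theorem pv_step_n_nd (r : List (Int × Int)) (a : Int) (e : Option Int) (i : Int) (c : Char)
    (h : pv_isint (String.mk [c]) = false) :
    get_num_idx_step (r, "IN_NUM", some a, e) (i, c) = (r ++ [(a, i)], "SEARCHING", some a, some i) := by
  simp [get_num_idx_step, h]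

-- combined invariant for both loop states, by one induction on the remaining chars
theorem pv_main (cs : List Char) : ∀ (i : Int) (retval : List (Int × Int)) (sa e : Option Int),
    (pvFinish ((PySem.List.enumerate cs i).foldl get_num_idx_step (retval, "SEARCHING", sa, e))
        (i + cs.length) = retval ++ get_num_idx_runs cs i)
    ∧ ∀ (a : Int),
      pvFinish ((PySem.List.enumerate cs i).foldl get_num_idx_step (retval, "IN_NUM", some a, e))
          (i + cs.length)
      = retval ++ (a, i + (cs.takeWhile (fun d => pv_isint (String.mk [d]))).length)
          :: get_num_idx_runs (cs.dropWhile (fun d => pv_isint (String.mk [d])))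
              (i + (cs.takeWhile (fun d => pv_isint (String.mk [d]))).length) := by
  induction cs with
  | nil =>
    intro i retval sa e
    refine ⟨by simp [PySem.List.enumerate_nil, pvFinish, get_num_idx_runs], fun a => ?_⟩
    simp [PySem.List.enumerate_nil, pvFinish, get_num_idx_runs]
  | cons c rest ih =>
    intro i retval sa e
    have harith : (i + ((rest.length : Int) + 1)) = i + 1 + (rest.length : Int) := by ring
    constructor
    · by_cases h : pv_isint (String.mk [c]) = true
      · have h2 := (ih (i + 1) retval (some i) e).2 i
        rw [PySem.List.enumerate_cons, List.foldl_cons, pv_step_s_dig _ _ _ _ _ h,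
          get_num_idx_runs, List.length_cons]
        push_cast
        rw [harith, h2]
        simp [h]
      · have hb : pv_isint (String.mk [c]) = false := by simpa using h
        have h1 := (ih (i + 1) retval sa e).1
        rw [PySem.List.enumerate_cons, List.foldl_cons, pv_step_s_nd _ _ _ _ _ hb,
          get_num_idx_runs, List.length_cons]
        push_cast
        rw [harith, h1]
        simp [hb]
    · intro a
      by_cases h : pv_isint (String.mk [c]) = true
      · have h2 := (ih (i + 1) retval (some a) e).2 a
        rw [PySem.List.enumerate_cons, List.foldl_cons, pv_step_n_dig _ _ _ _ _ h,
          List.length_cons]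
        push_cast
        rw [harith, h2]
        simp only [List.takeWhile_cons, List.dropWhile_cons, h, if_true, List.length_cons]
        push_cast
        ring_nf
      · have hb : pv_isint (String.mk [c]) = false := by simpa using h
        have h1 := (ih (i + 1) (retval ++ [(a, i)]) (some a) (some i)).1
        rw [PySem.List.enumerate_cons, List.foldl_cons, pv_step_n_nd _ _ _ _ _ hb,
          List.length_cons]
        push_cast
        rw [harith, h1]
        simp only [List.takeWhile_cons, List.dropWhile_cons, hb, Bool.false_eq_true, if_false]
        conv_rhs => rw [get_num_idx_runs.eq_def]
        simp [hb]

-- ===== VERDICT (by name: the statement is the Claim_ definition above) =====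
theorem get_num_idx_spec : Claim_equal_get_num_idx := by
  intro s _
  unfold Spec_get_num_idx get_num_idx get_num_idx_alt
  have he := PySem.List.enumerate_eq_map_pyRange (xs := s.toList) (d := ' ')
  have hmain := (pv_main s.toList 0 [] none none).1
  rw [he, List.foldl_map] at hmain
  simp only [PySem.Str.len_eq, PySem.List.len_eq] at *
  simpa [pvFinish] using hmain
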